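-- pv_equiv track=rewrite | github.com/sylvain-gerin/EyeFunctions-Python-Module | eyeFunctions/toolBox.py | interleaved
-- ===== SOURCE A (Python) =====
-- def interleaved(dataSet, split):
--     """ divide a dataSet into 'test' and 'train' rows in an interleaved fashion.
--     Return a list of train and test sets corresponding to each interleaved possibility
--     ex: data split into 3 subsets: will return 3 training sets [0,0,1],[1,0,0],[0,1,0], 1 being test and 0 training.
--     arguments:
--     dataSet -- a 1D or 2D list that has to be divided
--     split -- the number of sets to generate
--     """
--
--     nbOfsplits = split
--     allTrainingSets = []
--     allTestSets = []
--     # create the matrix of selection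
--     for thisCurrentTraining in range(nbOfsplits):
--         selectMatrix = [0]*nbOfsplits
--         selectMatrix[thisCurrentTraining] = 1
--         # generate a list of the current selection list
--         sequence = []
--         while len(sequence) < len(dataSet):
--             sequence += selectMatrix
--
--         # loop into the dataset and attribute subsets
--         test = []
--         training = []
--         for i,j in zip(sequence, dataSet):
--             if i == 0:
--                 training += [j]
--             else:
--                 test += [j]
--         allTrainingSets += [training]
--         allTestSets += [test]
--     return allTrainingSets, allTestSets
-- ===== SOURCE B (Python) =====
-- def interleaved(dataSet, split):
--     training = [[] for _ in range(split)]
--     test = [[] for _ in range(split)]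
--     if split > 0:
--         for index, row in enumerate(dataSet):
--             r = index % split
--             test[r].append(row)
--             for c in range(split):
--                 if c != r:
--                     training[c].append(row)
--     return training, test
-- ===== Notes on version B (the rewrite author's own statement) =====
-- stated objective: alternative
-- what changed: B makes a single distributing pass over the data, maintaining all split train/test buckets at once via index % split, instead of A's per-configuration rescans that build a 0/1 selection mask, tile it into a sequence and re-zip the whole dataSet for each of the split configurations.
import Mathlib
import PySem

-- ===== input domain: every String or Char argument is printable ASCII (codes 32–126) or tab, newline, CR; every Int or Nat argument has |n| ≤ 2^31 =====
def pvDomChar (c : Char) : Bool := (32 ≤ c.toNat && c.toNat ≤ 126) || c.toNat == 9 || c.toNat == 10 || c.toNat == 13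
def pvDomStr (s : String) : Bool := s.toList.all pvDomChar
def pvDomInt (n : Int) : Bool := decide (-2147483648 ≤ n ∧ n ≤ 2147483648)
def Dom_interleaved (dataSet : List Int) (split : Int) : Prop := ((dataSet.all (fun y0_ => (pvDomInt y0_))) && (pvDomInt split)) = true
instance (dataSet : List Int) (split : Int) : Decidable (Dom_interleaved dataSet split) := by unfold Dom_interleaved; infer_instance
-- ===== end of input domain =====

-- B replaces A's per-configuration rescans (0/1 mask, tiled sequence, full re-zip per split)
-- by one distributing pass over dataSet that maintains all split buckets at once (objective: alternative).

-- ===== PORT A =====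
-- 'while len(sequence) < len(dataSet): sequence += selectMatrix'; the 'sel.length = 0' branch only
-- makes the recursion total (Python loops forever there; interleaved never calls it that way).
def pvBuildSeq (sel : List Int) (dlen : Nat) (seq : List Int) : List Int :=
  if _h : seq.length < dlen then
    if _hs : sel.length = 0 then seq
    else pvBuildSeq sel dlen (seq ++ sel)
  else seq
termination_by dlen - seq.length
decreasing_by simp; omega

def interleaved (dataSet : List Int) (split : Int) : List (List Int) × List (List Int) :=
  let nbOfsplits := split
  (PySem.List.pyRange 0 nbOfsplits 1).foldl
    (fun acc thisCurrentTraining =>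
      -- selectMatrix = [0]*nbOfsplits; selectMatrix[thisCurrentTraining] = 1
      -- (index assignment ported by hand: exact, the index satisfies 0 ≤ k < nbOfsplits here)
      let selectMatrix := (List.replicate nbOfsplits.toNat (0 : Int)).set thisCurrentTraining.toNat 1
      let sequence := pvBuildSeq selectMatrix dataSet.length []
      let tt := (sequence.zip dataSet).foldl
        (fun (s : List Int × List Int) ij =>
          if ij.1 == 0 then (s.1 ++ [ij.2], s.2) else (s.1, s.2 ++ [ij.2]))
        ([], [])
      (acc.1 ++ [tt.1], acc.2 ++ [tt.2]))
    ([], [])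

-- ===== PORT B =====
def interleaved_alt (dataSet : List Int) (split : Int) : List (List Int) × List (List Int) :=
  let training := (PySem.List.pyRange 0 split 1).map (fun _ => ([] : List Int))
  let test := (PySem.List.pyRange 0 split 1).map (fun _ => ([] : List Int))
  if split > 0 then
    (PySem.List.enumerate dataSet).foldl
      (fun (s : List (List Int) × List (List Int)) p =>
        let r := PySem.Int.mod p.1 split
        -- test[r].append(row) / training[c].append(row): in-range index update, ported by hand (exact: 0 ≤ r < split)
        let test' := s.2.modify r.toNat (· ++ [p.2])
        let training' := (PySem.List.pyRange 0 split 1).foldl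
          (fun tr c => if c ≠ r then tr.modify c.toNat (· ++ [p.2]) else tr) s.1
        (training', test'))
      (training, test)
  else (training, test)

-- ===== PRECONDITION & SPEC =====
def Spec_interleaved (dataSet : List Int) (split : Int) (out : List (List Int) × List (List Int)) : Prop := out = interleaved_alt dataSet split
instance (dataSet : List Int) (split : Int) (out : List (List Int) × List (List Int)) : Decidable (Spec_interleaved dataSet split out) := by unfold Spec_interleaved; infer_instance

-- ===== CLAIM (what is proved, stated in full; the proofs are below) =====
def Claim_equal_interleaved : Prop := ∀ (dataSet : List Int) (split : Int), Dom_interleaved dataSet split → Spec_interleaved dataSet split (interleaved dataSet split)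

-- ===== LEMMAS AND PROOFS =====

-- reference splitting: bucket k of n, rows whose index ≢ k (train) / ≡ k (test) mod n
def trainSpec (n k : Nat) : Nat → List Int → List Int
  | _, [] => []
  | i, x :: xs => if i % n = k then trainSpec n k (i+1) xs else x :: trainSpec n k (i+1) xs

def testSpec (n k : Nat) : Nat → List Int → List Int
  | _, [] => []
  | i, x :: xs => if i % n = k then x :: testSpec n k (i+1) xs else testSpec n k (i+1) xs

def buckets (n : Nat) (ds : List Int) : List (List Int) × List (List Int) :=
  ((List.range n).map (fun k => trainSpec n k 0 ds),
   (List.range n).map (fun k => testSpec n k 0 ds))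

-- ---- A side ----

theorem selGet (n k j : Nat) (hj : j < n) :
    ((List.replicate n (0 : Int)).set k 1)[j]? = some (if j % n = k then 1 else 0) := by
  rw [List.getElem?_set]
  rcases eq_or_ne k j with h | h <;>
    simp [h, Nat.mod_eq_of_lt hj, hj] <;> omega

theorem buildSeq_spec (sel : List Int) (n k : Nat) (hn : 0 < n) (hlen : sel.length = n)
    (hsel : ∀ j, j < n → sel[j]? = some (if j % n = k then 1 else 0))
    (L : Nat) (seq : List Int) (hmod : seq.length % n = 0)
    (hseq : ∀ j, j < seq.length → seq[j]? = some (if j % n = k then 1 else 0)) :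
    L ≤ (pvBuildSeq sel L seq).length ∧
      ∀ j, j < (pvBuildSeq sel L seq).length →
        (pvBuildSeq sel L seq)[j]? = some (if j % n = k then 1 else 0) := by
  rw [pvBuildSeq]
  split
  · rename_i hL
    rw [dif_neg (by omega)]
    obtain ⟨c, hc⟩ : n ∣ seq.length := Nat.dvd_of_mod_eq_zero hmod
    refine buildSeq_spec sel n k hn hlen hsel L (seq ++ sel) ?_ ?_
    · simp only [List.length_append, hlen, hc]
      rw [show n * c + n = (c + 1) * n by ring]
      exact Nat.mul_mod_left _ _
    · intro j hj
      rw [List.getElem?_append]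
      simp only [List.length_append, hlen] at hj
      by_cases hcase : j < seq.length
      · rw [if_pos hcase]
        exact hseq j hcase
      · have h1 : j - seq.length < n := by omega
        rw [if_neg hcase, hsel _ h1]
        have hjm : j % n = (j - seq.length) % n := by
          conv_lhs => rw [show j = (j - seq.length) + n * c by omega]
          rw [Nat.add_mul_mod_self_left]
        rw [hjm, Nat.mod_eq_of_lt h1]
  · rename_i hL
    exact ⟨by omega, hseq⟩
termination_by L - seq.length
decreasing_by simp [hlen]; omega

theorem zipFold (n k : Nat) (ds : List Int) (i : Nat) (seq : List Int)
    (a b : List Int)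
    (hseq : ∀ j, j < ds.length → seq[j]? = some (if (i + j) % n = k then 1 else 0)) :
    (seq.zip ds).foldl
        (fun (s : List Int × List Int) ij =>
          if ij.1 == 0 then (s.1 ++ [ij.2], s.2) else (s.1, s.2 ++ [ij.2]))
        (a, b)
      = (a ++ trainSpec n k i ds, b ++ testSpec n k i ds) := by
  induction ds generalizing i seq a b with
  | nil => simp [trainSpec, testSpec]
  | cons x xs ih =>
    have h0 := hseq 0 (by simp)
    cases seq with
    | nil => simp at h0
    | cons s0 stl =>
      simp only [List.getElem?_cons_zero, Nat.add_zero] at h0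
      have h0' : s0 = if i % n = k then 1 else 0 := by
        injection h0
      subst h0'
      have htl : ∀ j, j < xs.length → stl[j]? = some (if (i + 1 + j) % n = k then 1 else 0) := by
        intro j hj
        have := hseq (j + 1) (by simp; omega)
        simpa [show i + (j + 1) = i + 1 + j by omega] using this
      rw [List.zip_cons_cons, List.foldl_cons]
      by_cases hik : i % n = k
      · have hc : ((if i % n = k then (1 : Int) else 0) == 0) = false := by
          simp [hik]
        rw [hc]
        simp only [Bool.false_eq_true, if_false]
        rw [ih (i + 1) stl a (b ++ [x]) htl]
        simp [trainSpec, testSpec, hik]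
      · have hc : ((if i % n = k then (1 : Int) else 0) == 0) = true := by
          simp [hik]
        rw [hc]
        simp only [if_true]
        rw [ih (i + 1) stl (a ++ [x]) b htl]
        simp [trainSpec, testSpec, hik]

theorem innerA (n k : Nat) (hn : 0 < n) (hk : k < n) (ds : List Int) :
    ((pvBuildSeq ((List.replicate n (0 : Int)).set k 1) ds.length []).zip ds).foldl
        (fun (s : List Int × List Int) ij =>
          if ij.1 == 0 then (s.1 ++ [ij.2], s.2) else (s.1, s.2 ++ [ij.2]))
        ([], [])
      = (trainSpec n k 0 ds, testSpec n k 0 ds) := by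
  have hsel : ∀ j, j < n → ((List.replicate n (0 : Int)).set k 1)[j]? = some (if j % n = k then 1 else 0) :=
    fun j hj => selGet n k j hj
  have hlen : ((List.replicate n (0 : Int)).set k 1).length = n := by simp
  obtain ⟨h1, h2⟩ := buildSeq_spec _ n k hn hlen hsel ds.length [] (by simp) (by simp)
  have := zipFold n k ds 0 _ [] []
    (fun j hj => by simpa using h2 j (by omega))
  simpa using this

theorem A_eq (ds : List Int) (n : Nat) (hn : 0 < n) :
    interleaved ds (n : Int) = buckets n ds := by
  unfold interleaved
  simp only []
  rw [PySem.List.foldl_prod_mk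
      (f := fun (acc : List (List Int)) (kI : Int) => acc ++
        [((pvBuildSeq ((List.replicate (n : Int).toNat (0 : Int)).set kI.toNat 1) ds.length []).zip ds).foldl
          (fun (s : List Int × List Int) ij =>
            if ij.1 == 0 then (s.1 ++ [ij.2], s.2) else (s.1, s.2 ++ [ij.2])) ([], []) |>.1])
      (g := fun (acc : List (List Int)) (kI : Int) => acc ++
        [((pvBuildSeq ((List.replicate (n : Int).toNat (0 : Int)).set kI.toNat 1) ds.length []).zip ds).foldl
          (fun (s : List Int × List Int) ij =>
            if ij.1 == 0 then (s.1 ++ [ij.2], s.2) else (s.1, s.2 ++ [ij.2])) ([], []) |>.2])]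
  rw [PySem.List.foldl_append_singleton_eq_map, PySem.List.foldl_append_singleton_eq_map]
  rw [PySem.List.pyRange_one]
  unfold buckets
  simp only [List.map_map, List.nil_append, Int.sub_zero, Int.toNat_natCast, Prod.mk.injEq]
  refine ⟨?_, ?_⟩ <;>
  · apply List.map_congr_left
    intro k hk
    simp only [List.mem_range] at hk
    simp only [Function.comp]
    rw [show ((0 : Int) + (k : Int)).toNat = k by omega]
    rw [innerA n k hn hk ds]

-- ---- B side ----

theorem rangeFold_getElem (n : Nat) (rI : Int) (x : Int) (T : List (List Int)) (j : Nat) :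
    ((PySem.List.pyRange 0 (n : Int) 1).foldl
        (fun tr c => if c ≠ rI then tr.modify c.toNat (· ++ [x]) else tr) T)[j]? =
      if j < n ∧ (j : Int) ≠ rI then T[j]?.map (· ++ [x]) else T[j]? := by
  induction n generalizing j with
  | zero =>
    rw [PySem.List.pyRange_one_eq_nil (by omega)]
    simp
  | succ m ih =>
    rw [show ((m + 1 : Nat) : Int) = (m : Int) + 1 by push_cast; ring,
      PySem.List.pyRange_one_succ_right (by omega), List.foldl_append]
    simp only [List.foldl_cons, List.foldl_nil]
    by_cases hm : (m : Int) ≠ rI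
    · rw [if_pos hm, List.getElem?_modify, Int.toNat_natCast, ih j]
      rcases eq_or_ne m j with hj | hj
      · subst hj
        rw [if_neg (by omega)]
        cases T[m]? <;> simp [hm]
      · rcases Decidable.em (j < m ∧ (j : Int) ≠ rI) with h | h
        · rw [if_pos h, if_pos ⟨by omega, h.2⟩]
          cases T[j]? <;> simp [hj]
        · rw [if_neg h, if_neg (by
            rintro ⟨h1, h2⟩
            exact h ⟨by omega, h2⟩)]
          cases T[j]? <;> simp [hj]
    · rw [if_neg hm, ih j]
      push_neg at hm
      rcases Decidable.em (j < m ∧ (j : Int) ≠ rI) with h | h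
      · rw [if_pos h, if_pos ⟨by omega, h.2⟩]
      · rw [if_neg h, if_neg (by
          rintro ⟨h1, h2⟩
          have : j ≠ m := fun hjm => h2 (by rw [hjm, hm])
          exact h ⟨by omega, h2⟩)]

theorem fmod_cast (i n : Nat) :
    PySem.Int.mod (i : Int) (n : Int) = ((i % n : Nat) : Int) := by
  unfold PySem.Int.mod
  rw [Int.fmod_eq_emod, if_pos (Or.inl (by positivity))]
  push_cast
  ring

theorem foldl_modify_length (l : List Int) (r : Int) (x : Int) :
    ∀ T : List (List Int),
      (l.foldl (fun tr c => if c ≠ r then tr.modify c.toNat (· ++ [x]) else tr) T).length = T.length := by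
  induction l with
  | nil => intro T; rfl
  | cons c cs ih =>
    intro T
    rw [List.foldl_cons]
    by_cases hc : c ≠ r
    · rw [if_pos hc, ih]
      simp
    · rw [if_neg hc, ih]

theorem B_inv (n : Nat) (hn : 0 < n) (ds : List Int) (i : Nat)
    (T S : List (List Int)) (hT : T.length = n) (hS : S.length = n) :
    (PySem.List.enumerate ds (i : Int)).foldl
        (fun (s : List (List Int) × List (List Int)) p =>
          ((PySem.List.pyRange 0 (n : Int) 1).foldl
            (fun tr c => if c ≠ PySem.Int.mod p.1 (n : Int) then tr.modify c.toNat (· ++ [p.2]) else tr) s.1,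
           s.2.modify (PySem.Int.mod p.1 (n : Int)).toNat (· ++ [p.2])))
        (T, S)
      = (T.mapIdx (fun c t => t ++ trainSpec n c i ds),
         S.mapIdx (fun c t => t ++ testSpec n c i ds)) := by
  induction ds generalizing i T S with
  | nil =>
    simp only [PySem.List.enumerate_nil, List.foldl_nil, Prod.mk.injEq]
    refine ⟨?_, ?_⟩
    · apply List.ext_getElem?
      intro j
      rw [List.getElem?_mapIdx]
      cases T[j]? <;> simp [trainSpec]
    · apply List.ext_getElem?
      intro j
      rw [List.getElem?_mapIdx]
      cases S[j]? <;> simp [testSpec]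
  | cons x xs ih =>
    rw [PySem.List.enumerate_cons, List.foldl_cons]
    simp only [fmod_cast i n]
    have hr : (((i % n : Nat) : Int)).toNat = i % n := by omega
    rw [hr]
    rw [show ((i : Int) + 1) = ((i + 1 : Nat) : Int) by push_cast; ring]
    rw [ih (i + 1) _ _ (by rw [foldl_modify_length]; exact hT) (by simpa using hS)]
    have hrn : i % n < n := Nat.mod_lt _ hn
    simp only [Prod.mk.injEq]
    refine ⟨?_, ?_⟩
    · apply List.ext_getElem?
      intro j
      rw [List.getElem?_mapIdx, rangeFold_getElem n _ x T j, List.getElem?_mapIdx]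
      by_cases hj : j < n
      · have hjT : j < T.length := by omega
        rw [List.getElem?_eq_getElem hjT]
        by_cases hjr : j = i % n
        · rw [if_neg (by simp [hjr])]
          simp [trainSpec, hjr]
        · rw [if_pos ⟨hj, by exact_mod_cast (by omega : ¬ (j : Int) = ((i % n : Nat) : Int))⟩]
          simp [trainSpec, Ne.symm hjr, hjr]
      · have hnone : T[j]? = none := List.getElem?_eq_none (by omega)
        rw [if_neg (fun hc => hj hc.1), hnone]
        simp
    · apply List.ext_getElem?
      intro j
      rw [List.getElem?_mapIdx, List.getElem?_modify, List.getElem?_mapIdx]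
      by_cases hjr : i % n = j
      · subst hjr
        have hjS : i % n < S.length := by omega
        rw [List.getElem?_eq_getElem hjS]
        simp [testSpec]
      · cases h : S[j]? with
        | none => simp [hjr]
        | some t =>
          simp [h, testSpec, hjr, Ne.symm hjr]

theorem B_eq (ds : List Int) (n : Nat) (hn : 0 < n) :
    interleaved_alt ds (n : Int) = buckets n ds := by
  unfold interleaved_alt
  simp only []
  rw [if_pos (by exact_mod_cast hn)]
  have hinit : (PySem.List.pyRange 0 (n : Int) 1).map (fun _ => ([] : List Int)) = List.replicate n [] := by
    rw [List.eq_replicate_iff]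
    refine ⟨by simp [PySem.List.length_pyRange_one], ?_⟩
    intro b hb
    simp only [List.mem_map] at hb
    obtain ⟨_, _, hb⟩ := hb
    exact hb.symm
  rw [hinit]
  have hB := B_inv n hn ds 0 (List.replicate n []) (List.replicate n []) (by simp) (by simp)
  simp only [Nat.cast_zero] at hB
  rw [hB]
  unfold buckets
  simp only [Prod.mk.injEq]
  refine ⟨?_, ?_⟩ <;>
  · apply List.ext_getElem?
    intro j
    rw [List.getElem?_mapIdx]
    by_cases hj : j < n
    · rw [List.getElem?_replicate, if_pos hj, List.getElem?_map, List.getElem?_range hj]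
      simp
    · rw [List.getElem?_replicate, if_neg hj, List.getElem?_map,
        List.getElem?_eq_none (by simpa using not_lt.mp hj)]
      simp

-- assemble

theorem both_nonpos (ds : List Int) (s : Int) (hs : s ≤ 0) :
    interleaved ds s = ([], []) ∧ interleaved_alt ds s = ([], []) := by
  have hnil := PySem.List.pyRange_one_eq_nil (a := 0) (b := s) hs
  have hsf : ¬ (s > 0) := by omega
  constructor
  · simp [interleaved, hnil]
  · simp [interleaved_alt, hnil, hsf]

-- ===== VERDICT (by name: the statement is the Claim_ definition above) =====
theorem interleaved_spec : Claim_equal_interleaved := by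
  intro ds s _
  unfold Spec_interleaved
  by_cases hs : s ≤ 0
  · obtain ⟨h1, h2⟩ := both_nonpos ds s hs
    rw [h1, h2]
  · have hs' : 0 < s := by omega
    have hn : 0 < s.toNat := by omega
    have hcast : ((s.toNat : Int)) = s := Int.toNat_of_nonneg (by omega)
    rw [← hcast, A_eq ds s.toNat hn, B_eq ds s.toNat hn]
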